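-- pv_equiv track=rewrite | github.com/blaze-the-star/BGECore | template/data/core/interface/label.py | reverse_text
-- ===== SOURCE A (Python) =====
-- def reverse_text(text):
-- 	""" Returns the reversed version of *text*
--
-- 	:arg string text: Original text.
-- 	:return: Reversed text.
-- 	"""
--
-- 	newText = ""
-- 	l = text.find("\n")
-- 	u = True
-- 	if l < 0:
-- 		l = len(text)
-- 		u = False
-- 	while(text != ""):
-- 		for x in range(l):
-- 			newText += text[(l-1)-x]
-- 		if u == True: newText += '\n'
-- 		text = text[l+1:]
-- 		l = text.find("\n")
-- 		if l < 0:
-- 			l = len(text)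
-- 			u = False
-- 	return newText
-- ===== SOURCE B (Python) =====
-- def reverse_text(text):
-- 	""" Returns the reversed version of *text*
--
-- 	:arg string text: Original text.
-- 	:return: Reversed text.
-- 	"""
-- 	return '\n'.join(reversed(text[::-1].split('\n')))
-- ===== Notes on version B (the rewrite author's own statement) =====
-- stated objective: simpler
-- what changed: Replaces the find/while/inner-index loop that reverses each line character by character with a single whole-string reversal followed by a split on newlines and a reversal of the segment list, joined back with newlines.
import Mathlib
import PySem

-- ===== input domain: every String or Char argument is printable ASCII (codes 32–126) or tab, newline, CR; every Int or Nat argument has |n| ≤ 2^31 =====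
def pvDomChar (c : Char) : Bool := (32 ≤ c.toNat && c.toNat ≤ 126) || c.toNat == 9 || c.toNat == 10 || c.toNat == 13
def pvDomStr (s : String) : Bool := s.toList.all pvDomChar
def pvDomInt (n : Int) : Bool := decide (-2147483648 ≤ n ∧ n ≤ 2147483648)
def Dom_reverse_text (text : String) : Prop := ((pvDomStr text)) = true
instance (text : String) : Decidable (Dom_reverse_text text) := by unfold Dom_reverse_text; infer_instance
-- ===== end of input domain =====

-- B replaces A's find/while loop (reversing each line character by character) by one whole-string
-- reversal, a split on newlines and a reversal of the segment list, joined back with newlines (simpler).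

-- ===== PORT A =====
-- «l = text.find("\n"); if l < 0: l = len(text); u = False» (run before the loop and at the end of each iteration)
def rtStep (cs : List Char) (u : Bool) : Nat × Bool :=
  let l := PySem.Chars.find cs ['\n']
  if l < 0 then (cs.length, false) else (l.toNat, u)

-- the while loop of A: cs is the shrinking «text», acc the accumulated «newText»
def rtLoop (cs : List Char) (l : Nat) (u : Bool) (acc : List Char) : List Char :=
  if h : cs = [] then acc
  else
    -- for x in range(l): newText += text[(l-1)-x]
    let acc1 := (PySem.List.pyRange 0 (l : Int) 1).foldl
      (fun a x => a ++ [PySem.List.pyGetD cs ((l : Int) - 1 - x) ' ']) acc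
    let acc2 := if u then acc1 ++ ['\n'] else acc1
    let cs' := PySem.List.slice cs (some ((l : Int) + 1)) none
    let p := rtStep cs' u
    rtLoop cs' p.1 p.2 acc2
termination_by cs.length
decreasing_by
  have hc : ((l : Int) + 1) = ((l + 1 : Nat) : Int) := by push_cast; ring
  rw [hc, PySem.List.slice_from_natCast]
  have hcs : cs.length ≠ 0 := by simpa using h
  simp only [List.length_drop]
  omega

def reverse_text (text : String) : String :=
  let p := rtStep text.toList true
  String.ofList (rtLoop text.toList p.1 p.2 [])

-- ===== PORT B =====
def reverse_text_alt (text : String) : String :=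
  -- '\n'.join(reversed(text[::-1].split('\n')))
  let rev := (PySem.List.slice? text.toList none none (-1)).getD []
  String.ofList (PySem.Chars.join ['\n'] (PySem.Chars.splitOn rev ['\n']).reverse)

-- ===== PRECONDITION & SPEC =====
def Spec_reverse_text (text : String) (out : String) : Prop := out = reverse_text_alt text
instance (text : String) (out : String) : Decidable (Spec_reverse_text text out) := by unfold Spec_reverse_text; infer_instance

-- ===== CLAIM (what is proved, stated in full; the proofs are below) =====
def Claim_equal_reverse_text : Prop := ∀ (text : String), Dom_reverse_text text → Spec_reverse_text text (reverse_text text)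

-- ===== LEMMAS AND PROOFS =====

-- structural model of Python's s.split('\n')
def splitNl : List Char → List (List Char)
  | [] => [[]]
  | c :: rest =>
    if c = '\n' then [] :: splitNl rest
    else match splitNl rest with
      | [] => [[c]]
      | h :: t => (c :: h) :: t

-- prepend xs to the first segment
def preCons (xs : List Char) : List (List Char) → List (List Char)
  | [] => [xs]
  | h :: t => (xs ++ h) :: t

-- append c to the last segment
def appLast : List (List Char) → Char → List (List Char)
  | [], c => [[c]]
  | [h], c => [h ++ [c]]
  | h :: h2 :: t, c => h :: appLast (h2 :: t) c

lemma splitNl_ne_nil (cs : List Char) : splitNl cs ≠ [] := by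
  cases cs with
  | nil => simp [splitNl]
  | cons c rest =>
    simp only [splitNl]
    split_ifs
    · simp
    · split <;> simp

lemma preCons_nil {P : List (List Char)} (h : P ≠ []) : preCons [] P = P := by
  cases P with
  | nil => exact absurd rfl h
  | cons p t => simp [preCons]

lemma splitNl_cons_ne {c : Char} (rest : List Char) (hc : c ≠ '\n') :
    splitNl (c :: rest) = preCons [c] (splitNl rest) := by
  simp only [splitNl, if_neg hc]
  cases h : splitNl rest <;> simp [preCons]

lemma preCons_preCons (xs ys : List Char) (P : List (List Char)) :
    preCons xs (preCons ys P) = preCons (xs ++ ys) P := by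
  cases P <;> simp [preCons]

lemma go_eq : ∀ (cs : List Char) (fuel : Nat) (cur : List Char) (acc : List (List Char)),
    cs.length ≤ fuel →
    PySem.Chars.splitOn.go ['\n'] fuel cs cur acc = acc.reverse ++ preCons cur.reverse (splitNl cs) := by
  intro cs
  induction cs with
  | nil =>
    intro fuel cur acc _
    cases fuel <;> simp [PySem.Chars.splitOn.go, splitNl, preCons]
  | cons c rest ih =>
    intro fuel cur acc hle
    cases fuel with
    | zero => simp at hle
    | succ f =>
      by_cases hc : c = '\n'
      · subst hc
        have hpre : ['\n'].isPrefixOf ('\n' :: rest) = true := by simp [List.isPrefixOf]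
        simp only [PySem.Chars.splitOn.go, hpre, if_true, List.length_singleton,
          List.drop_succ_cons, List.drop_zero]
        rw [ih f [] (cur.reverse :: acc) (by simpa using Nat.le_of_succ_le_succ hle)]
        simp only [List.reverse_nil, preCons_nil (splitNl_ne_nil rest)]
        simp [splitNl, preCons]
      · have hpre : ['\n'].isPrefixOf (c :: rest) = false := by
          simp [List.isPrefixOf]
          exact fun h => absurd h.symm hc
        simp only [PySem.Chars.splitOn.go, hpre]
        simp only [Bool.false_eq_true, if_false]
        rw [ih f (c :: cur) acc (by simpa using Nat.le_of_succ_le_succ hle)]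
        rw [splitNl_cons_ne rest hc, preCons_preCons]
        simp

lemma splitOn_eq (cs : List Char) : PySem.Chars.splitOn cs ['\n'] = splitNl cs := by
  unfold PySem.Chars.splitOn
  rw [go_eq cs (cs.length + 1) [] [] (by omega)]
  simp [preCons_nil (splitNl_ne_nil cs)]

lemma splitNl_no_nl {cs : List Char} (h : '\n' ∉ cs) : splitNl cs = [cs] := by
  induction cs with
  | nil => simp [splitNl]
  | cons c rest ih =>
    have hc : c ≠ '\n' := fun hh => h (hh ▸ List.mem_cons_self)
    rw [splitNl_cons_ne rest hc, ih (fun hm => h (List.mem_cons_of_mem _ hm))]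
    simp [preCons]

lemma splitNl_pre {pre : List Char} (rest : List Char) (h : '\n' ∉ pre) :
    splitNl (pre ++ '\n' :: rest) = pre :: splitNl rest := by
  induction pre with
  | nil => simp [splitNl]
  | cons c p ih =>
    have hc : c ≠ '\n' := fun hh => h (hh ▸ List.mem_cons_self)
    rw [List.cons_append, splitNl_cons_ne _ hc, ih (fun hm => h (List.mem_cons_of_mem _ hm))]
    simp [preCons]

lemma appLast_cons {P : List (List Char)} (h : List Char) (c : Char) (hP : P ≠ []) :
    appLast (h :: P) c = h :: appLast P c := by
  cases P with
  | nil => exact absurd rfl hP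
  | cons p t => simp [appLast]

lemma preCons_appLast (xs : List Char) (P : List (List Char)) (c : Char) :
    preCons xs (appLast P c) = appLast (preCons xs P) c := by
  match P with
  | [] => simp [preCons, appLast]
  | [h] => simp [preCons, appLast]
  | h :: h2 :: t => simp [preCons, appLast]

lemma splitNl_snoc_nl (xs : List Char) : splitNl (xs ++ ['\n']) = splitNl xs ++ [[]] := by
  induction xs with
  | nil => simp [splitNl]
  | cons a xs ih =>
    by_cases ha : a = '\n'
    · subst ha; simp [splitNl, ih]
    · rw [List.cons_append, splitNl_cons_ne _ ha, splitNl_cons_ne _ ha, ih]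
      cases h : splitNl xs with
      | nil => exact absurd h (splitNl_ne_nil xs)
      | cons p t => simp [preCons]


lemma splitNl_snoc_ne {c : Char} (xs : List Char) (hc : c ≠ '\n') :
    splitNl (xs ++ [c]) = appLast (splitNl xs) c := by
  induction xs with
  | nil => simp [splitNl, if_neg hc, appLast]
  | cons a xs ih =>
    by_cases ha : a = '\n'
    · subst ha
      simp only [List.cons_append, splitNl, if_true, ih]
      rw [appLast_cons _ _ (splitNl_ne_nil xs)]
    · rw [List.cons_append, splitNl_cons_ne _ ha, splitNl_cons_ne _ ha, ih, preCons_appLast]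

lemma appLast_append_singleton (Q : List (List Char)) (x : List Char) (c : Char) :
    appLast (Q ++ [x]) c = Q ++ [x ++ [c]] := by
  induction Q with
  | nil => simp [appLast]
  | cons q Q ih =>
    rw [List.cons_append, appLast_cons _ _ (by simp), ih]
    simp

lemma splitNl_reverse (cs : List Char) :
    splitNl cs.reverse = ((splitNl cs).map List.reverse).reverse := by
  induction cs with
  | nil => simp [splitNl]
  | cons c cs ih =>
    rw [List.reverse_cons]
    by_cases hc : c = '\n'
    · subst hc
      rw [splitNl_snoc_nl, ih]
      simp [splitNl]
    · rw [splitNl_snoc_ne _ hc, ih, splitNl_cons_ne _ hc]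
      cases h : splitNl cs with
      | nil => exact absurd h (splitNl_ne_nil cs)
      | cons p t =>
        simp only [preCons, List.map_cons, List.reverse_cons]
        rw [appLast_append_singleton]
        simp

-- the common value: each line reversed, lines kept in order
def jr (cs : List Char) : List Char := PySem.Chars.join ['\n'] ((splitNl cs).map List.reverse)

lemma join_cons {x : List Char} {ys : List (List Char)} (h : ys ≠ []) :
    PySem.Chars.join ['\n'] (x :: ys) = x ++ '\n' :: PySem.Chars.join ['\n'] ys := by
  cases ys with
  | nil => exact absurd rfl h
  | cons y t => simp [PySem.Chars.join, List.intercalate]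

lemma jr_nil : jr [] = [] := by simp [jr, splitNl, PySem.Chars.join, List.intercalate]

lemma jr_no_nl {cs : List Char} (h : '\n' ∉ cs) : jr cs = cs.reverse := by
  simp [jr, splitNl_no_nl h, PySem.Chars.join, List.intercalate]

lemma jr_pre {pre : List Char} (rest : List Char) (h : '\n' ∉ pre) :
    jr (pre ++ '\n' :: rest) = pre.reverse ++ '\n' :: jr rest := by
  rw [jr, splitNl_pre rest h, List.map_cons,
    join_cons (by simp [splitNl_ne_nil rest])]
  rfl

-- the inner for-loop of A appends the reversal of the first l characters
lemma forRev (cs : List Char) (l : Nat) (hl : l ≤ cs.length) (acc : List Char) :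
    (PySem.List.pyRange 0 (l : Int) 1).foldl
      (fun a x => a ++ [PySem.List.pyGetD cs ((l : Int) - 1 - x) ' ']) acc
    = acc ++ (cs.take l).reverse := by
  rw [PySem.List.foldl_append_singleton_eq_map, PySem.List.pyRange_zero_natCast, List.map_map]
  congr 1
  apply List.ext_getElem
  · simp; omega
  · intro i h1 h2
    simp only [List.getElem_map, List.getElem_range, Function.comp_apply]
    have hi : i < l := by simpa using h1
    have h0 : (0 : Int) ≤ (l : Int) - 1 - (i : Int) := by omega
    have hlt : (l : Int) - 1 - (i : Int) < (cs.length : Int) := by omega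
    rw [PySem.List.pyGetD_eq_getElem cs ' ' h0 hlt]
    rw [List.getElem_reverse]
    have ht : ((l : Int) - 1 - (i : Int)).toNat = l - 1 - i := by omega
    simp only [ht, List.getElem_take]
    congr 1
    simp at h2 ⊢
    omega

lemma find_pos_decomp {cs : List Char} (h : 0 ≤ PySem.Chars.find cs ['\n']) :
    let l := (PySem.Chars.find cs ['\n']).toNat
    l < cs.length ∧ '\n' ∉ cs.take l ∧ cs = cs.take l ++ '\n' :: cs.drop (l + 1) := by
  intro l
  obtain ⟨hpre, hmin⟩ := PySem.Chars.find_spec h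
  obtain ⟨t, ht⟩ := hpre
  have hdrop : cs.drop l = '\n' :: t := ht.symm
  have hlen : l < cs.length := by
    by_contra hge
    rw [List.drop_eq_nil_of_le (by omega)] at hdrop
    simp at hdrop
  refine ⟨hlen, ?_, ?_⟩
  · intro hmem
    obtain ⟨i, hi, hgi⟩ := List.getElem_of_mem hmem
    have hil : i < l := by simp at hi; omega
    have hic : i < cs.length := by omega
    rw [List.getElem_take] at hgi
    apply hmin i hil
    rw [List.drop_eq_getElem_cons hic, hgi]
    exact ⟨List.drop (i + 1) cs, rfl⟩
  · conv_lhs => rw [← List.take_append_drop l cs]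
    rw [hdrop]
    congr 1
    simp only [List.cons.injEq, true_and]
    have : t = (cs.drop l).tail := by rw [hdrop]; rfl
    rw [this, ← List.drop_drop]
    simp [Nat.add_comm]

lemma find_neg_no_nl {cs : List Char} (h : PySem.Chars.find cs ['\n'] < 0) : '\n' ∉ cs := by
  have h1 : PySem.Chars.find cs ['\n'] = -1 := by
    have := PySem.Chars.neg_one_le_find cs ['\n']
    omega
  have h2 := (PySem.Chars.find_eq_neg_one_iff (s := cs) (sub := ['\n'])).mp h1
  intro hm
  exact h2 ((List.singleton_infix_iff '\n' cs).mpr hm)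

lemma drop_cast (cs : List Char) (l : Nat) :
    PySem.List.slice cs (some ((l : Int) + 1)) none = cs.drop (l + 1) := by
  have hc : ((l : Int) + 1) = ((l + 1 : Nat) : Int) := by push_cast; ring
  rw [hc, PySem.List.slice_from_natCast]

lemma rtStep_nil (u : Bool) : rtStep [] u = (0, false) := by
  simp [rtStep, PySem.Chars.find, PySem.Chars.find.go]

lemma rtLoop_spec : ∀ (n : Nat) (cs : List Char) (acc : List Char), cs.length ≤ n →
    rtLoop cs (rtStep cs true).1 (rtStep cs true).2 acc = acc ++ jr cs := by
  intro n
  induction n with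
  | zero =>
    intro cs acc hle
    have : cs = [] := List.eq_nil_of_length_eq_zero (by omega)
    subst this
    rw [rtLoop, jr_nil]
    simp
  | succ n ih =>
    intro cs acc hle
    by_cases hnil : cs = []
    · subst hnil
      rw [rtLoop, jr_nil]; simp
    · by_cases hf : PySem.Chars.find cs ['\n'] < 0
      · -- no newline: one pass reverses everything, u becomes false, next text is empty
        have hno : '\n' ∉ cs := find_neg_no_nl hf
        have hstep : rtStep cs true = (cs.length, false) := by simp [rtStep, hf]
        rw [hstep]
        rw [rtLoop]
        simp only [hnil, dite_false]
        rw [forRev cs cs.length (le_refl _) acc, List.take_length]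
        simp only [Bool.false_eq_true, if_false]
        rw [drop_cast, List.drop_eq_nil_of_le (by omega), rtStep_nil]
        rw [rtLoop]
        simp [jr_no_nl hno]
      · -- newline at index l: reverse the first line, append '\n', recurse on the rest
        rw [not_lt] at hf
        obtain ⟨hlen, hnotin, hdecomp⟩ := find_pos_decomp hf
        set l := (PySem.Chars.find cs ['\n']).toNat with hl
        have hstep : rtStep cs true = (l, true) := by
          simp [rtStep, not_lt.mpr hf, hl]
        rw [hstep]
        rw [rtLoop]
        simp only [hnil, dite_false, if_true]
        rw [forRev cs l (by omega) acc]
        rw [drop_cast]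
        rw [ih (cs.drop (l + 1)) _ (by simp; omega)]
        conv_rhs => rw [hdecomp, jr_pre _ hnotin]
        simp

lemma alt_eq (text : String) :
    reverse_text_alt text = String.ofList (jr text.toList) := by
  unfold reverse_text_alt
  rw [PySem.List.slice?_none_none_neg_one]
  simp only [Option.getD_some]
  rw [splitOn_eq, splitNl_reverse]
  simp [jr]

-- ===== VERDICT (by name: the statement is the Claim_ definition above) =====
theorem reverse_text_spec : Claim_equal_reverse_text := by
  intro text _
  unfold Spec_reverse_text
  unfold reverse_text
  simp only []
  rw [alt_eq, rtLoop_spec text.toList.length text.toList [] (le_refl _)]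
  simp
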